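-- pv_equiv track=rewrite | github.com/sapkotaruz11/EDGE | src/gnn_explainers/trainer.py | get_lp_mutag_fid
-- ===== SOURCE A (Python) =====
-- def get_lp_mutag_fid(gnn_pred_dt_train, gnn_pred_dt_test, idx_map):
--     # function tro create learning problems for the Mutag dataset for fidelity evaluations based on GNN model predictions.
--     train_positive_examples = [
--         idx_map[item]["IRI"]
--         for item in gnn_pred_dt_train
--         if gnn_pred_dt_train[item] == 1
--     ]
--     train_negative_examples = [
--         idx_map[item]["IRI"]
--         for item in gnn_pred_dt_train
--         if gnn_pred_dt_train[item] == 0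
--     ]
--
--     # Positive and negative examples for test set
--     test_positive_examples = [
--         idx_map[item]["IRI"] for item in gnn_pred_dt_test if gnn_pred_dt_test[item] == 1
--     ]
--     test_negative_examples = [
--         idx_map[item]["IRI"] for item in gnn_pred_dt_test if gnn_pred_dt_test[item] == 0
--     ]
--     assert (
--         len(set(train_positive_examples).intersection(set(train_negative_examples)))
--         == 0
--     )
--
--     lp_dict_test_train = {
--         "carcino": {
--             "positive_examples_train": train_positive_examples,
--             "negative_examples_train": train_negative_examples,
--             "positive_examples_test": test_positive_examples,
--             "negative_examples_test": test_negative_examples,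
--         }
--     }
--     return lp_dict_test_train
-- ===== SOURCE B (Python) =====
-- def get_lp_mutag_fid(gnn_pred_dt_train, gnn_pred_dt_test, idx_map):
--     # Group each prediction dict into label-keyed buckets in one pass, then read
--     # the 1- and 0-buckets, instead of running four filtering comprehensions.
--     def group(pred):
--         buckets = {}
--         for item, val in pred.items():
--             if val in (0, 1):
--                 buckets.setdefault(val, []).append(idx_map[item]["IRI"])
--         return buckets.get(1, []), buckets.get(0, [])
--
--     train_pos, train_neg = group(gnn_pred_dt_train)
--     test_pos, test_neg = group(gnn_pred_dt_test)
--     assert not set(train_pos) & set(train_neg)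
--     return {
--         "carcino": {
--             "positive_examples_train": train_pos,
--             "negative_examples_train": train_neg,
--             "positive_examples_test": test_pos,
--             "negative_examples_test": test_neg,
--         }
--     }
-- ===== Notes on version B (the rewrite author's own statement) =====
-- stated objective: alternative
-- what changed: Replaces A's four filtering comprehensions with a label-keyed bucket dictionary built in one grouping pass per prediction dict (setdefault/append), from which the positive and negative lists are then read out.
import Mathlib
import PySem

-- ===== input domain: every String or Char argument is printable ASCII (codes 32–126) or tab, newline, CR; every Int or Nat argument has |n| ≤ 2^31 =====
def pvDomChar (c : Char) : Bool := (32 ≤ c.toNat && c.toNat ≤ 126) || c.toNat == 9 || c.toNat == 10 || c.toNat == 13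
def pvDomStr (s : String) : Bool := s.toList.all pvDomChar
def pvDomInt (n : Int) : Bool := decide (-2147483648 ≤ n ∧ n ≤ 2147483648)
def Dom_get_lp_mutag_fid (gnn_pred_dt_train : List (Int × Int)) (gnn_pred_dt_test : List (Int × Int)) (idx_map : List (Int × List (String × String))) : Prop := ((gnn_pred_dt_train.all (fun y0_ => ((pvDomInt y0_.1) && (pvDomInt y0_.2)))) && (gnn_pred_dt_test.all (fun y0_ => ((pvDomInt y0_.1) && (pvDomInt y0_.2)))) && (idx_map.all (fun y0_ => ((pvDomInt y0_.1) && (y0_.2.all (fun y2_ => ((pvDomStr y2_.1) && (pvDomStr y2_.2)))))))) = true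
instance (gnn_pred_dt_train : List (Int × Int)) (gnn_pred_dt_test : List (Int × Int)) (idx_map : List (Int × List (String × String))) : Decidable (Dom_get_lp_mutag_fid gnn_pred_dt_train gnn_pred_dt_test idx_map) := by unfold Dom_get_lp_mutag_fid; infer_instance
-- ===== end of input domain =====

-- B groups each prediction dict into a label-keyed bucket dictionary in one pass and
-- reads the 1- and 0-buckets, instead of A's four filtering comprehensions
-- (objective: alternative decomposition, same asymptotic cost).

-- ===== PORT A =====
-- shared helper: idx_map[item]["IRI"] (default "" is unreachable under Pre_, which requires both lookups to succeed)
def aIri (dim : PySem.Dict Int (List (String × String))) (k : Int) : String :=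
  ((PySem.Dict.ofList (dim.getD k [])).get? "IRI").getD ""

def get_lp_mutag_fid (gnn_pred_dt_train : List (Int × Int)) (gnn_pred_dt_test : List (Int × Int)) (idx_map : List (Int × List (String × String))) : List (String × List (String × List String)) :=
  let dtr := PySem.Dict.ofList gnn_pred_dt_train
  let dte := PySem.Dict.ofList gnn_pred_dt_test
  let dim := PySem.Dict.ofList idx_map
  let train_positive_examples := (dtr.keys.filter (fun k => dtr.getD k 0 == 1)).map (aIri dim)
  let train_negative_examples := (dtr.keys.filter (fun k => dtr.getD k 0 == 0)).map (aIri dim)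
  let test_positive_examples := (dte.keys.filter (fun k => dte.getD k 0 == 1)).map (aIri dim)
  let test_negative_examples := (dte.keys.filter (fun k => dte.getD k 0 == 0)).map (aIri dim)
  -- the assert raises outside Pre_; under Pre_ it always passes
  [("carcino",
    [("positive_examples_train", train_positive_examples),
     ("negative_examples_train", train_negative_examples),
     ("positive_examples_test", test_positive_examples),
     ("negative_examples_test", test_negative_examples)])]

-- ===== PORT B =====
-- one grouping pass: buckets.setdefault(val, []).append(iri) for val in (0, 1),
-- then read buckets.get(1, []) and buckets.get(0, [])
def bGroup (dim : PySem.Dict Int (List (String × String))) (items : List (Int × Int)) : List String × List String :=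
  let buckets := items.foldl (fun d p =>
    if p.2 == 0 || p.2 == 1 then d.modify p.2 [] (· ++ [aIri dim p.1]) else d)
    PySem.Dict.empty
  (buckets.getD 1 [], buckets.getD 0 [])

def get_lp_mutag_fid_alt (gnn_pred_dt_train : List (Int × Int)) (gnn_pred_dt_test : List (Int × Int)) (idx_map : List (Int × List (String × String))) : List (String × List (String × List String)) :=
  let dim := PySem.Dict.ofList idx_map
  let tr := bGroup dim (PySem.Dict.ofList gnn_pred_dt_train).items
  let te := bGroup dim (PySem.Dict.ofList gnn_pred_dt_test).items
  [("carcino",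
    [("positive_examples_train", tr.1),
     ("negative_examples_train", tr.2),
     ("positive_examples_test", te.1),
     ("negative_examples_test", te.2)])]

-- ===== PRECONDITION & SPEC =====
-- Pre_ excludes exactly the inputs where Python A raises: a KeyError (a predicted key with
-- value 0 or 1 missing from idx_map, or its entry missing "IRI") or the AssertionError
-- (a train key predicted 1 and a train key predicted 0 sharing the same IRI).
def Pre_get_lp_mutag_fid (gnn_pred_dt_train : List (Int × Int)) (gnn_pred_dt_test : List (Int × Int)) (idx_map : List (Int × List (String × String))) : Prop :=
  let dim := PySem.Dict.ofList idx_map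
  let trIt := (PySem.Dict.ofList gnn_pred_dt_train).items
  let teIt := (PySem.Dict.ofList gnn_pred_dt_test).items
  (∀ p ∈ trIt ++ teIt, (p.2 = 1 ∨ p.2 = 0) →
      (((dim.get? p.1).bind (fun a => (PySem.Dict.ofList a).get? "IRI")).isSome = true)) ∧
  (∀ p ∈ trIt, ∀ q ∈ trIt, p.2 = 1 → q.2 = 0 →
      ((PySem.Dict.ofList (dim.getD p.1 [])).get? "IRI").getD "" ≠
      ((PySem.Dict.ofList (dim.getD q.1 [])).get? "IRI").getD "")

instance (gnn_pred_dt_train : List (Int × Int)) (gnn_pred_dt_test : List (Int × Int)) (idx_map : List (Int × List (String × String))) : Decidable (Pre_get_lp_mutag_fid gnn_pred_dt_train gnn_pred_dt_test idx_map) := by unfold Pre_get_lp_mutag_fid; infer_instance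

def pvWitness_get_lp_mutag_fid : (List (Int × Int)) × (List (Int × Int)) × (List (Int × List (String × String))) :=
  ([(0, 1), (1, 0)], [(2, 1)], [(0, [("IRI", "a")]), (1, [("IRI", "b")]), (2, [("IRI", "c")])])

def Spec_get_lp_mutag_fid (gnn_pred_dt_train : List (Int × Int)) (gnn_pred_dt_test : List (Int × Int)) (idx_map : List (Int × List (String × String))) (out : List (String × List (String × List String))) : Prop := out = get_lp_mutag_fid_alt gnn_pred_dt_train gnn_pred_dt_test idx_map
instance (gnn_pred_dt_train : List (Int × Int)) (gnn_pred_dt_test : List (Int × Int)) (idx_map : List (Int × List (String × String))) (out : List (String × List (String × List String))) : Decidable (Spec_get_lp_mutag_fid gnn_pred_dt_train gnn_pred_dt_test idx_map out) := by unfold Spec_get_lp_mutag_fid; infer_instance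

-- ===== CLAIM (what is proved, stated in full; the proofs are below) =====
def Claim_equal_get_lp_mutag_fid : Prop := ∀ (gnn_pred_dt_train : List (Int × Int)) (gnn_pred_dt_test : List (Int × Int)) (idx_map : List (Int × List (String × String))), Dom_get_lp_mutag_fid gnn_pred_dt_train gnn_pred_dt_test idx_map → Pre_get_lp_mutag_fid gnn_pred_dt_train gnn_pred_dt_test idx_map → Spec_get_lp_mutag_fid gnn_pred_dt_train gnn_pred_dt_test idx_map (get_lp_mutag_fid gnn_pred_dt_train gnn_pred_dt_test idx_map)

-- ===== LEMMAS AND PROOFS =====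

-- B's grouping fold: for a label v ∈ {0, 1}, the v-bucket accumulates exactly the
-- filtered-and-mapped list.
theorem bGroup_getD (dim : PySem.Dict Int (List (String × String))) (l : List (Int × Int))
    (d : PySem.Dict Int (List String)) (v : Int) (hv : v = 0 ∨ v = 1) :
    (l.foldl (fun d p =>
        if p.2 == 0 || p.2 == 1 then d.modify p.2 [] (· ++ [aIri dim p.1]) else d) d).getD v []
      = d.getD v [] ++ (l.filter (fun p => p.2 == v)).map (fun p => aIri dim p.1) := by
  induction l generalizing d with
  | nil => simp
  | cons p t ih =>
    simp only [List.foldl_cons, List.filter_cons]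
    by_cases h01 : (p.2 == 0 || p.2 == 1) = true
    · rw [if_pos h01, ih, PySem.Dict.getD_modify]
      by_cases hvp : v = p.2
      · simp [hvp.symm]
      · have hbv : (p.2 == v) = false := by simpa using fun h => hvp h.symm
        simp [hvp, hbv]
    · have hne : (p.2 == v) = false := by
        rcases hv with rfl | rfl <;> simpa using fun h => h01 (by simp [h])
      rw [if_neg h01, ih]
      simp [hne]

theorem bGroup_eq (dim : PySem.Dict Int (List (String × String))) (l : List (Int × Int)) :
    bGroup dim l = ((l.filter (fun p => p.2 == 1)).map (fun p => aIri dim p.1),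
                    (l.filter (fun p => p.2 == 0)).map (fun p => aIri dim p.1)) := by
  unfold bGroup
  dsimp only []
  rw [bGroup_getD dim l _ 1 (Or.inr rfl), bGroup_getD dim l _ 0 (Or.inl rfl)]
  simp

-- A's key-filtering pass over a dict equals the item-level filter (keys are nodup).
theorem keysFilter_eq (d : PySem.Dict Int Int) (dim : PySem.Dict Int (List (String × String)))
    (hnd : d.keys.Nodup) (v : Int) :
    (d.keys.filter (fun k => d.getD k 0 == v)).map (aIri dim)
      = (d.items.filter (fun p => p.2 == v)).map (fun p => aIri dim p.1) := by
  have hk : d.keys = d.items.map Prod.fst := rfl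
  rw [hk, List.filter_map]
  have hcongr : (d.items.filter ((fun k => d.getD k 0 == v) ∘ Prod.fst))
      = d.items.filter (fun p => p.2 == v) := by
    apply List.filter_congr
    intro p hp
    have := PySem.Dict.getD_of_mem_items (d := d) (k := p.1) (v := p.2)
      (by simpa using hp) hnd (d0 := 0)
    simp [Function.comp, this]
  rw [hcongr, List.map_map]
  rfl

-- ===== VERDICT (by name: the statement is the Claim_ definition above) =====
theorem get_lp_mutag_fid_spec : Claim_equal_get_lp_mutag_fid := by
  intro tr te im _ _
  unfold Spec_get_lp_mutag_fid get_lp_mutag_fid get_lp_mutag_fid_alt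
  simp only [bGroup_eq, keysFilter_eq _ _ (PySem.Dict.nodup_keys_ofList _)]
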